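-- pv_equiv track=rewrite | github.com/c-hydro/shybox | shybox/generic_toolkit/lib_utils_namelist.py | read_namelist_group
-- ===== SOURCE A (Python) =====
-- from typing import Tuple, List
--
-- def read_namelist_group(settings_blocks: List[str]) -> dict:
--     """
--     Group settings.
--     :param settings_lines:
--     :param group_re:
--     :return: group_blocks
--     """
--
--     settings_groups = {}
--     for settings_block in settings_blocks:
--         settings_lines_raw = settings_block.split('\n')
--
--         settings_block_name = settings_lines_raw.pop(0).strip()
--         settings_groups[settings_block_name] = {}
--
--         settings_lines_filtered = []
--         for line in settings_lines_raw:
--             # cleanup string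
--             line = line.strip()
--             if line == "":
--                 continue
--             if line.startswith('!'):
--                 continue
--
--             try:
--                 k, v = line.split('=')
--                 settings_lines_filtered.append(line)
--             except ValueError:
--                 # no = in current line, try to append to previous line
--                 if settings_lines_filtered[-1].endswith(','):
--                     settings_lines_filtered[-1] += line
--                 else:
--                     raise
--
--         for line in settings_lines_filtered:
--             # commas at the end of lines seem to be optional
--             if line.endswith(','):
--                 line = line[:-1]
--
--             # inline comments are allowed, but we remove them for now
--             if "!" in line:
--                 line = line.split("!")[0].strip()
--
--             k, v = line.split('=')
--             variable_name = k.strip()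
--             variable_value = v.strip()
--
--             settings_groups[settings_block_name][variable_name] = variable_value
--
--     return settings_groups
-- ===== SOURCE B (Python) =====
-- def _store(buf, entries):
--     # finalize one buffered logical line into entries
--     if buf is None:
--         return
--     if buf.endswith(','):
--         buf = buf[:-1]
--     if '!' in buf:
--         buf = buf.split('!')[0].strip()
--     k, v = buf.split('=')
--     entries[k.strip()] = v.strip()
--
--
-- def read_namelist_group(settings_blocks):
--     settings_groups = {}
--     for settings_block in settings_blocks:
--         lines = settings_block.split('\n')
--         name = lines[0].strip()
--         entries = {}
--         buf = None  # current logical line (assignment possibly awaiting continuations)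
--         for raw in lines[1:]:
--             s = raw.strip()
--             if not s or s.startswith('!'):
--                 continue
--             if len(s.split('=')) == 2:
--                 _store(buf, entries)
--                 buf = s
--             else:
--                 if buf is None or not buf.endswith(','):
--                     raise ValueError("cannot parse namelist line: %r" % s)
--                 buf += s
--         _store(buf, entries)
--         settings_groups[name] = entries
--     return settings_groups
-- ===== Notes on version B (the rewrite author's own statement) =====
-- stated objective: alternative
-- what changed: A builds each block's dict in two passes (filter lines into a list while merging continuation lines in place, then re-scan that list to parse every entry); B makes a single pass per block keeping one buffered logical line that is finalized and stored as soon as the next assignment (or the end of the block) is seen.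
import Mathlib
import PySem

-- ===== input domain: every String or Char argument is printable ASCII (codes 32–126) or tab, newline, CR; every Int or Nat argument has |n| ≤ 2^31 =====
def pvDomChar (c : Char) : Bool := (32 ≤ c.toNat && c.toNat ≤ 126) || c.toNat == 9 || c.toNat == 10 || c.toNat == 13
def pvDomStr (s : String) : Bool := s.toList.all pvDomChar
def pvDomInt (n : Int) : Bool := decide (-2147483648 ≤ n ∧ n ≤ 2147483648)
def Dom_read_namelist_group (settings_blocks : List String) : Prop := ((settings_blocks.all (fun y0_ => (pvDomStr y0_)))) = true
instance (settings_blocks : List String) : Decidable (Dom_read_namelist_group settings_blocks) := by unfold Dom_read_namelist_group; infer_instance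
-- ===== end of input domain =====

-- B replaces A's two passes (filter/merge into a list, then parse it) by a single pass per block
-- keeping one buffered logical line; same return value (objective: alternative decomposition).


-- ===== PORT A =====
-- pass 1 of A: cleanup, skip blanks/comments, append assignments, merge continuations
-- (the two `raise` paths leave the state unchanged; they are excluded by Pre_).
def pvAFilterStep (acc : List String) (line : String) : List String :=
  let s := PySem.Str.strip line
  if s == "" then acc
  else if PySem.Str.startswith s "!" then acc
  else
    match PySem.Str.split? s "=" with
    | some [_, _] => acc ++ [s]                -- k, v = line.split('=') succeeded
    | _ =>                                     -- ValueError: try to append to previous line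
      match acc.getLast? with
      | some last =>
          if PySem.Str.endswith last "," then acc.dropLast ++ [last ++ s]
          else acc                             -- re-raise (outside Pre_)
      | none => acc                            -- IndexError (outside Pre_)

-- pass 2 of A: strip trailing comma, drop inline comment, split on '=' and store
def pvAParseStep (inn : PySem.Dict String String) (line : String) : PySem.Dict String String :=
  let l1 := if PySem.Str.endswith line "," then PySem.Str.slice line none (some (-1)) else line
  let l2 := if PySem.Str.isIn "!" l1 then PySem.Str.strip (((PySem.Str.split? l1 "!").getD []).headD "") else l1
  match PySem.Str.split? l2 "=" with
  | some [k, v] => inn.insert (PySem.Str.strip k) (PySem.Str.strip v)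
  | _ => inn                                   -- ValueError (outside Pre_)

def pvABlock (groups : PySem.Dict String (PySem.Dict String String)) (block : String) :
    PySem.Dict String (PySem.Dict String String) :=
  let raw := (PySem.Str.split? block "\n").getD []
  let name := PySem.Str.strip (raw.headD "")
  let groups1 := groups.insert name PySem.Dict.empty
  let filtered := raw.tail.foldl pvAFilterStep []
  groups1.insert name (filtered.foldl pvAParseStep PySem.Dict.empty)

def read_namelist_group (settings_blocks : List String) : List (String × List (String × String)) :=
  (settings_blocks.foldl pvABlock PySem.Dict.empty).items.map (fun p => (p.1, p.2.items))

-- ===== PORT B =====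
-- B's _store helper: finalize the buffered logical line (None buffers nothing)
def pvStore : Option String → PySem.Dict String String → PySem.Dict String String
  | none, entries => entries
  | some buf, entries =>
    let b1 := if PySem.Str.endswith buf "," then PySem.Str.slice buf none (some (-1)) else buf
    let b2 := if PySem.Str.isIn "!" b1 then PySem.Str.strip (((PySem.Str.split? b1 "!").getD []).headD "") else b1
    match PySem.Str.split? b2 "=" with
    | some [k, v] => entries.insert (PySem.Str.strip k) (PySem.Str.strip v)
    | _ => entries                             -- ValueError (outside Pre_)

-- B's single pass: state = (current logical-line buffer, entries built so far)
def pvBStep (st : Option String × PySem.Dict String String) (raw : String) :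
    Option String × PySem.Dict String String :=
  let s := PySem.Str.strip raw
  if s == "" then st
  else if PySem.Str.startswith s "!" then st
  else if ((PySem.Str.split? s "=").getD []).length == 2 then
    (some s, pvStore st.1 st.2)
  else
    match st.1 with
    | some b => if PySem.Str.endswith b "," then (some (b ++ s), st.2) else st   -- else raise (outside Pre_)
    | none => st                                                                -- raise (outside Pre_)

def pvBBlock (groups : PySem.Dict String (PySem.Dict String String)) (block : String) :
    PySem.Dict String (PySem.Dict String String) :=
  let lines := (PySem.Str.split? block "\n").getD []
  let name := PySem.Str.strip (lines.headD "")
  let st := lines.tail.foldl pvBStep (none, PySem.Dict.empty)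
  groups.insert name (pvStore st.1 st.2)

def read_namelist_group_alt (settings_blocks : List String) : List (String × List (String × String)) :=
  (settings_blocks.foldl pvBBlock PySem.Dict.empty).items.map (fun p => (p.1, p.2.items))

-- ===== PRECONDITION & SPEC =====
-- Pre_ helpers are independent copies (Pre_ may not reach the ports).
def pvPreIsAssign (s : String) : Bool := ((PySem.Str.split? s "=").getD []).length == 2

def pvPreFinalOk (l : String) : Bool :=
  let l1 := if PySem.Str.endswith l "," then PySem.Str.slice l none (some (-1)) else l
  let l2 := if PySem.Str.isIn "!" l1 then PySem.Str.strip (((PySem.Str.split? l1 "!").getD []).headD "") else l1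
  ((PySem.Str.split? l2 "=").getD []).length == 2

def pvPreMeaningful (b : String) : List String :=
  (((PySem.Str.split? b "\n").getD []).tail.map PySem.Str.strip).filter
    (fun s => !(s == "" || PySem.Str.startswith s "!"))

-- a block is well formed iff every continuation line follows a line ending in ','
-- and every logical line (assignment plus its continuations) still splits in two on '='
-- after dropping a trailing comma and an inline '!' comment
def pvPreBlockOk (b : String) : Bool :=
  let ms := pvPreMeaningful b
  (List.range ms.length).all (fun i =>
    if pvPreIsAssign (ms.getD i "") then
      pvPreFinalOk (PySem.Str.join "" (ms.getD i "" :: (ms.drop (i+1)).takeWhile (fun t => !pvPreIsAssign t)))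
    else
      decide (0 < i) && PySem.Str.endswith (ms.getD (i-1) "") ",")

-- Pre_ holds exactly where Python A returns (elsewhere it raises ValueError/IndexError).
def Pre_read_namelist_group (settings_blocks : List String) : Prop :=
  settings_blocks.all pvPreBlockOk = true
instance (settings_blocks : List String) : Decidable (Pre_read_namelist_group settings_blocks) := by
  unfold Pre_read_namelist_group; infer_instance

def pvWitness_read_namelist_group : List String :=
  ["group\n a = 1,\n 2,\n 3\n b = 2 ! c\n! comment\n\n"]

def Spec_read_namelist_group (settings_blocks : List String) (out : List (String × List (String × String))) : Prop := out = read_namelist_group_alt settings_blocks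
instance (settings_blocks : List String) (out : List (String × List (String × String))) : Decidable (Spec_read_namelist_group settings_blocks out) := by unfold Spec_read_namelist_group; infer_instance

-- ===== CLAIM (what is proved, stated in full; the proofs are below) =====
def Claim_equal_read_namelist_group : Prop := ∀ (settings_blocks : List String), Dom_read_namelist_group settings_blocks → Pre_read_namelist_group settings_blocks → Spec_read_namelist_group settings_blocks (read_namelist_group settings_blocks)

-- ===== LEMMAS AND PROOFS =====
-- A's pass-1 step, with the unpacking match re-expressed as a length test
theorem pvAFilterStep_eq (acc : List String) (line : String) :
    pvAFilterStep acc line =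
      (if PySem.Str.strip line == "" then acc
       else if PySem.Str.startswith (PySem.Str.strip line) "!" then acc
       else if ((PySem.Str.split? (PySem.Str.strip line) "=").getD []).length == 2 then
         acc ++ [PySem.Str.strip line]
       else match acc.getLast? with
         | some last =>
             if PySem.Str.endswith last "," then acc.dropLast ++ [last ++ PySem.Str.strip line]
             else acc
         | none => acc) := by
  unfold pvAFilterStep
  rcases hp : PySem.Str.split? (PySem.Str.strip line) "=" with _ | ps
  · simp [hp]
  · rcases ps with _ | ⟨k, _ | ⟨v, _ | ⟨w, t⟩⟩⟩ <;> simp [hp]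

-- B's step with the state pair written out
theorem pvBStep_eq (buf : Option String) (d : PySem.Dict String String) (line : String) :
    pvBStep (buf, d) line =
      (if PySem.Str.strip line == "" then (buf, d)
       else if PySem.Str.startswith (PySem.Str.strip line) "!" then (buf, d)
       else if ((PySem.Str.split? (PySem.Str.strip line) "=").getD []).length == 2 then
         (some (PySem.Str.strip line), pvStore buf d)
       else match buf with
         | some b =>
             if PySem.Str.endswith b "," then (some (b ++ PySem.Str.strip line), d)
             else (buf, d)
         | none => (buf, d)) := rfl

theorem pvStore_some (l : String) (e : PySem.Dict String String) :
    pvStore (some l) e = pvAParseStep e l := rfl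

theorem pvStore_none (e : PySem.Dict String String) : pvStore none e = e := rfl

-- flushing B's buffer equals parsing the corresponding suffix of A's filtered list
theorem pvStore_toList (buf : Option String) (F : List String) :
    pvStore buf (F.foldl pvAParseStep PySem.Dict.empty)
      = (F ++ buf.toList).foldl pvAParseStep PySem.Dict.empty := by
  cases buf with
  | none => rw [pvStore_none, show Option.toList (none : Option String) = [] from rfl, List.append_nil]
  | some b => rw [pvStore_some, show Option.toList (some b) = [b] from rfl, List.foldl_append, List.foldl_cons, List.foldl_nil]

-- loop invariant: B's state (buf, entries) corresponds to A's filtered list F ++ buf.toList,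
-- with entries = the parse of F; holds on every input (the error paths of both ports agree).
theorem pvLoopEq (lines : List String) :
    ∀ (F : List String) (buf : Option String), (buf = none → F = []) →
    pvStore (lines.foldl pvBStep (buf, F.foldl pvAParseStep PySem.Dict.empty)).1
            (lines.foldl pvBStep (buf, F.foldl pvAParseStep PySem.Dict.empty)).2
      = (lines.foldl pvAFilterStep (F ++ buf.toList)).foldl pvAParseStep PySem.Dict.empty := by
  induction lines with
  | nil =>
    intro F buf h
    simpa using pvStore_toList buf F
  | cons line rest ih =>
    intro F buf h
    rw [List.foldl_cons, List.foldl_cons, pvAFilterStep_eq, pvBStep_eq]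
    by_cases hs : PySem.Str.strip line == ""
    · rw [if_pos hs, if_pos hs]; exact ih F buf h
    · rw [if_neg hs, if_neg hs]
      by_cases hc : PySem.Str.startswith (PySem.Str.strip line) "!"
      · rw [if_pos hc, if_pos hc]; exact ih F buf h
      · rw [if_neg hc, if_neg hc]
        by_cases hl : ((PySem.Str.split? (PySem.Str.strip line) "=").getD []).length == 2
        · -- an assignment: A appends it, B flushes the buffer and restarts it
          rw [if_pos hl, if_pos hl, pvStore_toList buf F]
          have := ih (F ++ buf.toList) (some (PySem.Str.strip line)) (by simp)
          simpa using this
        · -- a continuation candidate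
          rw [if_neg hl, if_neg hl]
          cases buf with
          | none =>
            have hF := h rfl; subst hF
            simpa using ih [] none (fun _ => rfl)
          | some b =>
            simp only [Option.toList_some, List.getLast?_concat]
            by_cases hb : PySem.Str.endswith b ","
            · rw [if_pos hb, if_pos hb, List.dropLast_concat]
              simpa using ih F (some (b ++ PySem.Str.strip line)) (by simp)
            · rw [if_neg hb, if_neg hb]
              exact ih F (some b) h

theorem pvBlock_eq (g : PySem.Dict String (PySem.Dict String String)) (block : String) :
    pvABlock g block = pvBBlock g block := by
  simp only [pvABlock, pvBBlock]
  rw [PySem.Dict.insert_insert_self]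
  have := pvLoopEq (((PySem.Str.split? block "\n").getD []).tail) [] none (fun _ => rfl)
  simp only [Option.toList_none, List.append_nil, List.foldl_nil] at this
  rw [← this]

-- ===== VERDICT (by name: the statement is the Claim_ definition above) =====
theorem read_namelist_group_spec : Claim_equal_read_namelist_group := by
  intro blocks _hdom _hpre
  unfold Spec_read_namelist_group read_namelist_group read_namelist_group_alt
  have hf : pvABlock = pvBBlock := funext fun g => funext fun b => pvBlock_eq g b
  rw [hf]
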